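-- pv_equiv track=rewrite | github.com/pypi-data/pypi-mirror-9 | packages/skoolkit/skoolkit-4.3.tar.gz/skoolkit-4.3/skoolkit/skoolparser.py | get_defb_length
-- ===== SOURCE A (Python) =====
-- FORMAT_NO_BASE = {
--     'b': 'b{}',
--     'd': '{}',
--     'h': '{}'
-- }
--
-- FORMAT_DEFM_NO_BASE = {
--     'b': 'b{}',
--     'd': 'B{}',
--     'h': 'B{}'
-- }
--
-- FORMAT_PRESERVE_BASE = {
--     'b': 'b{}',
--     'd': 'd{}',
--     'h': 'h{}'
-- }
--
-- def _get_base(item, preserve_base):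
--     if item.startswith('%'):
--         return 'b'
--     if item.startswith('$') and preserve_base:
--         return 'h'
--     return 'd'
--
-- def get_defb_length(item_str, preserve_base, defb=True):
--     if defb:
--         byte_fmt = FORMAT_NO_BASE
--         text_fmt = 'T{}'
--     else:
--         byte_fmt = FORMAT_DEFM_NO_BASE
--         text_fmt = '{}'
--     if preserve_base:
--         byte_fmt = FORMAT_PRESERVE_BASE
--     full_length = 0
--     lengths = []
--     length = 0
--     prev_base = None
--     for item in get_defb_item_list(item_str) + ['""']:
--         if item.startswith('"'):
--             if length:
--                 lengths.append(byte_fmt[prev_base].format(length))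
--                 full_length += length
--                 length = 0
--                 prev_base = None
--             i = 1
--             while i < len(item) - 1:
--                 if item[i] == '\\':
--                     i += 1
--                 i += 1
--                 length += 1
--             if length:
--                 lengths.append(text_fmt.format(length))
--                 full_length += length
--                 length = 0
--         else:
--             cur_base = _get_base(item, preserve_base)
--             if prev_base != cur_base and length:
--                 lengths.append(byte_fmt[prev_base].format(length))
--                 full_length += length
--                 length = 0
--             length += 1
--             prev_base = cur_base
--     return full_length, ':'.join(lengths)
--
-- def get_defb_item_list(item_str):
--     items = []
--     i = 0
--     while i < len(item_str):
--         char = item_str[i]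
--         if char.isspace() or char == ',':
--             i += 1
--         elif char == '"':
--             item = char
--             i += 1
--             while i < len(item_str):
--                 msg_char = item_str[i]
--                 item += msg_char
--                 if msg_char == '\\':
--                     item += item_str[i + 1]
--                     i += 2
--                 elif msg_char == '"':
--                     items.append(item)
--                     i += 1
--                     break
--                 else:
--                     i += 1
--         else:
--             end = item_str.find(',', i + 1)
--             if end < 0:
--                 end = len(item_str)
--             items.append(item_str[i:end])
--             i = end + 1
--     return items
-- ===== SOURCE B (Python) =====
-- # B: single-pass tokenizer emitting ('t', count)/('y', base) tokens (no item
-- # substrings built), then a run-merging pass over the tokens.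
--
-- def _byte_prefix(base, preserve_base, defb):
--     if preserve_base:
--         return base
--     if base == 'b':
--         return 'b'
--     return '' if defb else 'B'
--
-- def _tokens(s, preserve_base):
--     tokens = []
--     i = 0
--     n = len(s)
--     while i < n:
--         c = s[i]
--         if c == '"':
--             count = 0
--             j = i + 1
--             closed = False
--             while j < n:
--                 if s[j] == '"':
--                     j += 1
--                     closed = True
--                     break
--                 if s[j] == '\\':
--                     j += 2
--                 else:
--                     j += 1
--                 count += 1
--             if closed:
--                 tokens.append(('t', count))
--             i = j
--         elif c == ',' or c.isspace():
--             i += 1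
--         else:
--             base = 'b' if c == '%' else ('h' if c == '$' and preserve_base else 'd')
--             tokens.append(('y', base))
--             e = s.find(',', i + 1)
--             i = n if e < 0 else e + 1
--     return tokens
--
-- def get_defb_length(item_str, preserve_base, defb=True):
--     text_prefix = 'T' if defb else ''
--     tokens = _tokens(item_str, preserve_base)
--     full_length = 0
--     parts = []
--     k = 0
--     n = len(tokens)
--     while k < n:
--         kind, val = tokens[k]
--         if kind == 't':
--             if val:
--                 parts.append(text_prefix + str(val))
--                 full_length += val
--             k += 1
--         else:
--             j = k
--             while j < n and tokens[j] == ('y', val):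
--                 j += 1
--             run = j - k
--             parts.append(_byte_prefix(val, preserve_base, defb) + str(run))
--             full_length += run
--             k = j
--     return full_length, ':'.join(parts)
-- ===== Notes on version B (the rewrite author's own statement) =====
-- stated objective: alternative
-- what changed: B replaces A's item-substring builder plus stateful prev_base/length accumulator by a single-pass tokenizer that emits ('t', n)/('y', base) tokens directly (counting escape units without materialising the quoted item strings) and a second pass that merges maximal runs of equal-base byte tokens.
import Mathlib
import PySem

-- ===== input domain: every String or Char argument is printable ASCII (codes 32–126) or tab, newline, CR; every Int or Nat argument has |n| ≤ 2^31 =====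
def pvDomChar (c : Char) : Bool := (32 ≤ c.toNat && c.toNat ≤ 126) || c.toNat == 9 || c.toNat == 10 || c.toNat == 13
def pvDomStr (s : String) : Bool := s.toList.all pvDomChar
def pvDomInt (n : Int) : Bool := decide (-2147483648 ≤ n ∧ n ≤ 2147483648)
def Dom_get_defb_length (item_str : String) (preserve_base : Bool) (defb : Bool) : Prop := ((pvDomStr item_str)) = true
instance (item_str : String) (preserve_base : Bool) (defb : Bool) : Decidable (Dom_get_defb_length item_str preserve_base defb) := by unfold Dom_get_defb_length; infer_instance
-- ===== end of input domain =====

-- B replaces A's item-substring builder + stateful prev_base/length accumulator by a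
-- direct tokenizer (('text', n) / ('byte', base) tokens) and a run-merging pass; same
-- cost, different decomposition ("alternative").

-- ===== PORT A =====

-- _get_base(item, preserve_base)
def pvGetBaseA (item : List Char) (preserve_base : Bool) : Char :=
  if PySem.Chars.startswith item ['%'] then 'b'
  else if PySem.Chars.startswith item ['$'] && preserve_base then 'h'
  else 'd'

-- byte_fmt[base].format(length) for the dict A selected (FORMAT_NO_BASE /
-- FORMAT_DEFM_NO_BASE, overridden by FORMAT_PRESERVE_BASE); keys are 'b','d','h'
def pvByteFmtA (preserve_base defb : Bool) (base : Char) (n : Int) : List Char :=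
  if preserve_base then
    (if base = 'b' then 'b' :: PySem.Int.toChars n
     else if base = 'd' then 'd' :: PySem.Int.toChars n
     else 'h' :: PySem.Int.toChars n)
  else if defb then
    (if base = 'b' then 'b' :: PySem.Int.toChars n
     else PySem.Int.toChars n)
  else
    (if base = 'b' then 'b' :: PySem.Int.toChars n
     else 'B' :: PySem.Int.toChars n)

-- text_fmt.format(length)
def pvTextFmtA (defb : Bool) (n : Int) : List Char :=
  if defb then 'T' :: PySem.Int.toChars n else PySem.Int.toChars n

-- inner while of get_defb_item_list scanning a '"' item (item accumulates the chars);
-- where Python raises IndexError (escape backslash as last char, excluded by Pre_)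
-- this returns (none, []), the same "no item appended, i = len" outcome as an
-- unterminated string (on which Python returns normally)
def pvScanA (item : List Char) (cs : List Char) : Option (List Char) × List Char :=
  match cs with
  | [] => (none, [])
  | m :: rest =>
    if m = '\\' then
      match rest with
      | [] => (none, [])
      | n :: rest' => pvScanA (item ++ [m] ++ [n]) rest'
    else if m = '"' then (some (item ++ [m]), rest)
    else pvScanA (item ++ [m]) rest

theorem pvScanA_rest_le (item cs : List Char) : (pvScanA item cs).2.length ≤ cs.length := by
  fun_induction pvScanA item cs <;> simp_all [pvScanA] <;> omega

-- get_defb_item_list, recursing on the remaining suffix (i ↦ drop i)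
def pvItemsA (cs : List Char) : List (List Char) :=
  match h : cs with
  | [] => []
  | c :: rest =>
    if PySem.Chars.isspace c || c = ',' then pvItemsA rest
    else if c = '"' then
      match hs : pvScanA ['"'] rest with
      | (some item, rest') => item :: pvItemsA rest'
      | (none, _) => []
    else
      (c :: rest.takeWhile (fun x => x ≠ ',')) :: pvItemsA ((rest.dropWhile (fun x => x ≠ ',')).drop 1)
termination_by cs.length
decreasing_by
  · simp
  · have := pvScanA_rest_le ['"'] rest
    rw [hs] at this
    simp at this ⊢; omega
  · have := rest.length_dropWhile_le (fun x => x ≠ ',')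
    simp at this ⊢; omega

-- the char-counting while loop over a '"' item (i from 1 while i < len(item)-1)
def pvCountA (item : List Char) (i : Nat) (acc : Int) : Int :=
  if _h : i + 1 < item.length then
    let i' := if item.getD i ' ' = '\\' then i + 1 else i
    pvCountA item (i' + 1) (acc + 1)
  else acc
termination_by item.length - i
decreasing_by split <;> omega

-- the main for-loop of get_defb_length: state (full_length, lengths, length, prev_base);
-- each Python branch (flush pending bytes / emit text / extend or flush a byte run) is a branch here
def pvLoopA (pb db : Bool) (items : List (List Char)) (full : Int) (lens : List (List Char))
    (length : Int) (prev : Option Char) : Int × List (List Char) :=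
  match items with
  | [] => (full, lens)
  | item :: rest =>
    if PySem.Chars.startswith item ['"'] then
      if length ≠ 0 then
        -- flush the pending byte run, then count the string's chars
        if pvCountA item 1 0 ≠ 0 then
          pvLoopA pb db rest ((full + length) + pvCountA item 1 0)
            ((lens ++ [pvByteFmtA pb db (prev.getD 'd') length]) ++ [pvTextFmtA db (pvCountA item 1 0)])
            0 none
        else
          pvLoopA pb db rest (full + length) (lens ++ [pvByteFmtA pb db (prev.getD 'd') length])
            (pvCountA item 1 0) none
      else
        if pvCountA item 1 length ≠ 0 then
          pvLoopA pb db rest (full + pvCountA item 1 length)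
            (lens ++ [pvTextFmtA db (pvCountA item 1 length)]) 0 prev
        else
          pvLoopA pb db rest full lens (pvCountA item 1 length) prev
    else
      if prev ≠ some (pvGetBaseA item pb) ∧ length ≠ 0 then
        pvLoopA pb db rest (full + length) (lens ++ [pvByteFmtA pb db (prev.getD 'd') length])
          1 (some (pvGetBaseA item pb))
      else
        pvLoopA pb db rest full lens (length + 1) (some (pvGetBaseA item pb))

def get_defb_length (item_str : String) (preserve_base : Bool) (defb : Bool) : Int × String :=
  let items := pvItemsA item_str.toList ++ [['"', '"']]
  let r := pvLoopA preserve_base defb items 0 [] 0 none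
  (r.1, String.ofList (PySem.Chars.join [':'] r.2))

-- ===== PORT B =====

inductive PvTok where
  | text : Int → PvTok
  | byte : Char → PvTok
deriving DecidableEq, Repr

-- _byte_prefix(base, preserve_base, defb)
def pvBytePrefixB (base : Char) (preserve_base defb : Bool) : List Char :=
  if preserve_base then [base]
  else if base = 'b' then ['b']
  else if defb then [] else ['B']

-- the inner counting while loop of _tokens over a '"' literal: (count if closed, rest after the closing quote)
def pvCntB (cs : List Char) (count : Int) : Option Int × List Char :=
  match cs with
  | [] => (none, [])
  | c :: rest =>
    if c = '"' then (some count, rest)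
    else if c = '\\' then
      match rest with
      | [] => (none, [])   -- j overshoots the end: unterminated
      | _ :: rest' => pvCntB rest' (count + 1)
    else pvCntB rest (count + 1)

theorem pvCntB_rest_le (cs : List Char) (count : Int) : (pvCntB cs count).2.length ≤ cs.length := by
  fun_induction pvCntB cs count <;> simp_all [pvCntB] <;> omega

-- _tokens(s, preserve_base), recursing on the remaining suffix
def pvTokensB (cs : List Char) (preserve_base : Bool) : List PvTok :=
  match cs with
  | [] => []
  | c :: rest =>
    if c = '"' then
      match hs : pvCntB rest 0 with
      | (some cnt, rest') => PvTok.text cnt :: pvTokensB rest' preserve_base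
      | (none, _) => []
    else if c = ',' || PySem.Chars.isspace c then pvTokensB rest preserve_base
    else
      let base := if c = '%' then 'b' else if c = '$' && preserve_base then 'h' else 'd'
      PvTok.byte base :: pvTokensB ((rest.dropWhile (fun x => x ≠ ',')).drop 1) preserve_base
termination_by cs.length
decreasing_by
  · have := pvCntB_rest_le rest 0
    rw [hs] at this
    simp at this ⊢; omega
  · simp
  · have := rest.length_dropWhile_le (fun x => x ≠ ',')
    simp at this ⊢; omega

-- the merging while loop of B: maximal run of equal byte tokens → one segment
def pvMergeB (pb db : Bool) (toks : List PvTok) : Int × List (List Char) :=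
  match toks with
  | [] => (0, [])
  | PvTok.text v :: rest =>
    let r := pvMergeB pb db rest
    if v ≠ 0 then (v + r.1, ((if db then ['T'] else []) ++ PySem.Int.toChars v) :: r.2) else r
  | PvTok.byte b :: rest =>
    let run : Int := 1 + (rest.takeWhile (fun t => t = PvTok.byte b)).length
    let r := pvMergeB pb db (rest.dropWhile (fun t => t = PvTok.byte b))
    (run + r.1, (pvBytePrefixB b pb db ++ PySem.Int.toChars run) :: r.2)
termination_by toks.length
decreasing_by
  · simp
  · have := rest.length_dropWhile_le (fun t => t = PvTok.byte b)
    simp at this ⊢; omega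

def get_defb_length_alt (item_str : String) (preserve_base : Bool) (defb : Bool) : Int × String :=
  let toks := pvTokensB item_str.toList preserve_base
  let r := pvMergeB preserve_base defb toks
  (r.1, String.ofList (PySem.Chars.join [':'] r.2))

-- ===== PRECONDITION & SPEC =====

-- scan-state automaton over the input: 0 = between items, 1 = inside an unquoted item,
-- 2 = inside a string literal, 3 = inside a string literal right after an escape backslash
def pvEscStep (st : Nat) (c : Char) : Nat :=
  if st = 0 then (if c = ',' || PySem.Chars.isspace c then 0 else if c = '"' then 2 else 1)
  else if st = 1 then (if c = ',' then 0 else 1)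
  else if st = 2 then (if c = '"' then 0 else if c = '\\' then 3 else 2)
  else 2

def pvEscState (cs : List Char) : Nat := cs.foldl pvEscStep 0

-- Pre_ excludes exactly the inputs on which A raises IndexError: strings ending one
-- character after an escape backslash inside a string literal (final scan state 3),
-- where get_defb_item_list reads item_str[i + 1] past the end.
def Pre_get_defb_length (item_str : String) (preserve_base : Bool) (defb : Bool) : Prop :=
  pvEscState item_str.toList ≠ 3
instance (item_str : String) (preserve_base : Bool) (defb : Bool) : Decidable (Pre_get_defb_length item_str preserve_base defb) := by unfold Pre_get_defb_length; infer_instance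

def pvWitness_get_defb_length : String × Bool × Bool := ("1,2,%101,$FF,\"ab\\\"c\",3", true, true)

def Spec_get_defb_length (item_str : String) (preserve_base : Bool) (defb : Bool) (out : Int × String) : Prop := out = get_defb_length_alt item_str preserve_base defb
instance (item_str : String) (preserve_base : Bool) (defb : Bool) (out : Int × String) : Decidable (Spec_get_defb_length item_str preserve_base defb out) := by unfold Spec_get_defb_length; infer_instance

-- ===== CLAIM (what is proved, stated in full; the proofs are below) =====
def Claim_equal_get_defb_length : Prop := ∀ (item_str : String) (preserve_base : Bool) (defb : Bool), Dom_get_defb_length item_str preserve_base defb → Pre_get_defb_length item_str preserve_base defb → Spec_get_defb_length item_str preserve_base defb (get_defb_length item_str preserve_base defb)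

-- ===== LEMMAS AND PROOFS =====

-- escape-aware unit count of the chars of a '"' item from position 1 on (structural form of pvCountA)
def pvCUnits : List Char → Int
  | [] => 0
  | [_] => 0
  | c :: d :: r => 1 + (if c = '\\' then pvCUnits r else pvCUnits (d :: r))

-- the token a single item of get_defb_item_list contributes
def pvTokOf (pb : Bool) (item : List Char) : PvTok :=
  if PySem.Chars.startswith item ['"'] then PvTok.text (pvCountA item 1 0)
  else PvTok.byte (pvGetBaseA item pb)

theorem pvFmt_eq (pb db : Bool) (b : Char) (n : Int) (hb : b = 'b' ∨ b = 'd' ∨ b = 'h') :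
    pvByteFmtA pb db b n = pvBytePrefixB b pb db ++ PySem.Int.toChars n := by
  rcases hb with h | h | h <;> subst h <;> cases pb <;> cases db <;>
    simp [pvByteFmtA, pvBytePrefixB]

theorem pvTextFmt_eq (db : Bool) (n : Int) :
    pvTextFmtA db n = (if db then ['T'] else []) ++ PySem.Int.toChars n := by
  cases db <;> simp [pvTextFmtA]

theorem pvScanA_append (acc cs : List Char) : ∀ pre,
    pvScanA (pre ++ acc) cs = ((pvScanA acc cs).1.map (pre ++ ·), (pvScanA acc cs).2) := by
  fun_induction pvScanA acc cs with
  | case1 a => intro pre; simp [pvScanA]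
  | case2 a => intro pre; simp [pvScanA]
  | case3 a n r ih =>
    intro pre
    rw [show (pvScanA (pre ++ a) ('\\' :: n :: r)) = pvScanA ((pre ++ a) ++ ['\\'] ++ [n]) r from by
      conv_lhs => rw [pvScanA.eq_def]
      simp]
    rw [show (pre ++ a) ++ ['\\'] ++ [n] = pre ++ (a ++ ['\\'] ++ [n]) from by simp, ih pre]
  | case4 a r h =>
    intro pre
    conv_lhs => rw [pvScanA.eq_def]
    simp
  | case5 a n r h1 h2 ih =>
    intro pre
    rw [show (pvScanA (pre ++ a) (n :: r)) = pvScanA ((pre ++ a) ++ [n]) r from by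
      conv_lhs => rw [pvScanA.eq_def]
      simp [h1, h2]]
    rw [show (pre ++ a) ++ [n] = pre ++ (a ++ [n]) from by simp, ih pre]

theorem pvScanA_nil (acc cs : List Char) :
    pvScanA acc cs = ((pvScanA [] cs).1.map (acc ++ ·), (pvScanA [] cs).2) := by
  have := pvScanA_append [] cs acc
  simpa using this

theorem pvScanA_some_longer (acc cs : List Char) :
    ∀ it r, pvScanA acc cs = (some it, r) → acc.length < it.length := by
  fun_induction pvScanA acc cs with
  | case1 a => intro it r h; simp [pvScanA] at h
  | case2 a => intro it r h; simp [pvScanA] at h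
  | case3 a n r0 ih =>
    intro it r h
    have := ih it r h
    simp at this ⊢; omega
  | case4 a r0 hne =>
    intro it r h
    simp at h
    obtain ⟨h1, _⟩ := h
    subst h1; simp
  | case5 a n r0 h1 h2 ih =>
    intro it r h
    have := ih it r h
    simp at this ⊢; omega

theorem pvScanA_nil_some_ne (cs it r : List Char) (h : pvScanA [] cs = (some it, r)) : it ≠ [] := by
  have := pvScanA_some_longer [] cs it r h
  simp at this
  exact List.ne_nil_of_length_pos this

theorem pvCountA_eq (item : List Char) (i : Nat) (acc : Int) :
    pvCountA item i acc = acc + pvCUnits (item.drop i) := by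
  fun_induction pvCountA item i acc with
  | case1 i acc h i' ih =>
    by_cases hb : item.getD i ' ' = '\\'
    · have hi' : i' = i + 1 := by simp only [i']; rw [dif_pos hb]
      rw [hi'] at ih
      have hd : item.drop i = item[i] :: item[i + 1] :: item.drop (i + 1 + 1) := by
        rw [List.drop_eq_getElem_cons (by omega), List.drop_eq_getElem_cons (by omega)]
      have hgi : item[i] = '\\' := by
        rw [← List.getD_eq_getElem item ' ' (by omega)]; exact hb
      rw [hi', ih, hd, hgi]
      simp [pvCUnits]
      omega
    · have hi' : i' = i := by simp only [i']; rw [dif_neg hb]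
      rw [hi'] at ih
      have hd : item.drop i = item[i] :: item.drop (i + 1) := List.drop_eq_getElem_cons (by omega)
      have hd2 : item.drop (i + 1) = item[i + 1] :: item.drop (i + 1 + 1) :=
        List.drop_eq_getElem_cons (by omega)
      have hgi : item[i] ≠ '\\' := fun hh => hb (by
        rw [List.getD_eq_getElem item ' ' (by omega)]; exact hh)
      rw [hi', ih, hd, hd2]
      simp only [pvCUnits, if_neg hgi]
      omega
  | case2 i acc h =>
    have hlen : (item.drop i).length ≤ 1 := by simp; omega
    match hd : item.drop i with
    | [] => simp [pvCUnits]
    | [x] => simp [pvCUnits]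
    | x :: y :: r => rw [hd] at hlen; simp at hlen

-- B's direct counting loop agrees with A's scan-then-count
theorem pvCnt_scan (cs : List Char) (count : Int) :
    pvCntB cs count = (match pvScanA [] cs with
      | (some it, r) => (some (count + pvCUnits it), r)
      | (none, _) => (none, [])) := by
  fun_induction pvCntB cs count with
  | case1 count => simp [pvScanA]
  | case2 count r =>
    rw [show pvScanA [] ('"' :: r) = (some ['"'], r) from by
      conv_lhs => rw [pvScanA.eq_def]
      simp]
    simp [pvCUnits]
  | case3 count hq =>
    rw [show pvScanA [] (['\\'] : List Char) = (none, []) from by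
      conv_lhs => rw [pvScanA.eq_def]
      simp]
  | case4 count d r hq ih =>
    rw [show pvScanA [] ('\\' :: d :: r) = pvScanA (['\\'] ++ [d]) r from by
      conv_lhs => rw [pvScanA.eq_def]
      simp]
    rw [pvScanA_nil (['\\'] ++ [d]) r, ih]
    match ho : pvScanA [] r with
    | (some it, r2) => simp [pvCUnits]; omega
    | (none, r2) => simp
  | case5 count c r hq hb ih =>
    rw [show pvScanA [] (c :: r) = pvScanA [c] r from by
      conv_lhs => rw [pvScanA.eq_def]
      simp [hq, hb]]
    rw [pvScanA_nil [c] r, ih]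
    match ho : pvScanA [] r with
    | (some it, r2) =>
      have hne := pvScanA_nil_some_ne r it r2 ho
      match it with
      | [] => exact absurd rfl hne
      | u :: us =>
        simp only [Option.map_some]
        show _ = (some (count + pvCUnits (c :: u :: us)), r2)
        simp [pvCUnits, hb]
        omega
    | (none, r2) => simp

-- B's tokenizer emits exactly one token per item of A's get_defb_item_list
theorem pvTokens_eq (cs : List Char) (pb : Bool) :
    pvTokensB cs pb = (pvItemsA cs).map (pvTokOf pb) := by
  fun_induction pvTokensB cs pb with
  | case1 =>
    rw [pvItemsA.eq_def]
    simp
  | case2 rest cnt rest2 hs ih =>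
    have h := pvCnt_scan rest 0
    rw [hs] at h
    obtain ⟨it, hscan, hcnt⟩ : ∃ it, pvScanA [] rest = (some it, rest2) ∧ cnt = pvCUnits it := by
      match ho : pvScanA [] rest with
      | (some it, r2) =>
        rw [ho] at h
        simp only [Prod.mk.injEq, Option.some.injEq] at h
        refine ⟨it, ?_, ?_⟩
        · rw [h.2]
        · have := h.1; omega
      | (none, r2) => rw [ho] at h; simp at h
    have hito : pvScanA ['"'] rest = (some ('"' :: it), rest2) := by
      rw [pvScanA_nil ['"'] rest, hscan]; simp
    have hA : pvItemsA ('"' :: rest) = ('"' :: it) :: pvItemsA rest2 := by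
      conv_lhs => rw [pvItemsA.eq_def]
      simp only []
      rw [if_neg (by decide), if_pos trivial, hito]
    have htok : pvTokOf pb ('"' :: it) = PvTok.text cnt := by
      unfold pvTokOf
      rw [if_pos (by simp [PySem.Chars.startswith_iff])]
      rw [pvCountA_eq]
      simp [hcnt]
    rw [hA, List.map_cons, htok, ih]
  | case3 rest r2 hs =>
    have h := pvCnt_scan rest 0
    rw [hs] at h
    match ho : pvScanA [] rest with
    | (some it, rr) => rw [ho] at h; simp at h
    | (none, rr) =>
      have hito : pvScanA ['"'] rest = (none, rr) := by
        rw [pvScanA_nil ['"'] rest, ho]; simp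
      rw [show pvItemsA ('"' :: rest) = [] from by
        conv_lhs => rw [pvItemsA.eq_def]
        simp only []
        rw [if_neg (by decide), if_pos trivial, hito]]
      simp
  | case4 c rest h1 h2 ih =>
    have hsp : (PySem.Chars.isspace c || decide (c = ',')) = true := by
      rw [Bool.or_comm]; exact h2
    rw [show pvItemsA (c :: rest) = pvItemsA rest from by
      conv_lhs => rw [pvItemsA.eq_def]
      simp [hsp], ← ih]
  | case5 c rest h1 h2 base ih =>
    have hsp : ¬(PySem.Chars.isspace c || decide (c = ',')) = true := by
      rw [Bool.or_comm]; exact h2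
    have hA : pvItemsA (c :: rest) = (c :: rest.takeWhile (fun x => x ≠ ','))
        :: pvItemsA ((rest.dropWhile (fun x => x ≠ ',')).drop 1) := by
      conv_lhs => rw [pvItemsA.eq_def]
      simp only []
      rw [if_neg hsp, if_neg h1]
    have htok : pvTokOf pb (c :: rest.takeWhile (fun x => x ≠ ',')) = PvTok.byte base := by
      unfold pvTokOf pvGetBaseA
      rw [if_neg (by
        simp only [PySem.Chars.startswith_iff]
        intro hcon
        rw [List.cons_prefix_cons] at hcon
        exact h1 hcon.1.symm)]
      have hpc : ∀ (x : Char) (t : List Char), PySem.Chars.startswith (c :: t) [x] = (decide (c = x)) := by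
        intro x t
        cases hd : decide (c = x) with
        | true =>
          simp only [decide_eq_true_eq] at hd
          subst hd
          exact (PySem.Chars.startswith_iff _ _).2 (by simp [List.cons_prefix_cons])
        | false =>
          simp only [decide_eq_false_iff_not] at hd
          cases hsw : PySem.Chars.startswith (c :: t) [x] with
          | false => rfl
          | true =>
            have := (PySem.Chars.startswith_iff _ _).1 hsw
            rw [List.cons_prefix_cons] at this
            exact absurd this.1.symm hd
      rw [hpc, hpc]
      show PvTok.byte _ = PvTok.byte base
      congr 1
      by_cases hc1 : c = '%'
      · simp [hc1, base]
      · by_cases hc2 : (c = '$') ∧ pb = true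
        · simp [hc1, hc2.1, hc2.2, base]
        · have : (decide (c = '$') && pb) = false := by
            cases hh : decide (c = '$') with
            | false => simp
            | true =>
              simp only [decide_eq_true_eq] at hh
              cases hpb : pb with
              | false => simp
              | true => exact absurd ⟨hh, hpb⟩ hc2
          simp [hc1, this, base]
    rw [hA, List.map_cons, htok, ih]

theorem pvMergeB_run (pb db : Bool) (k : Nat) (hk : 0 < k) (b : Char) (ts : List PvTok)
    (hts : ∀ t ∈ ts.head?, t ≠ PvTok.byte b) :
    pvMergeB pb db (List.replicate k (PvTok.byte b) ++ ts)
      = ((k : Int) + (pvMergeB pb db ts).1,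
         (pvBytePrefixB b pb db ++ PySem.Int.toChars (k : Int)) :: (pvMergeB pb db ts).2) := by
  obtain ⟨j, rfl⟩ : ∃ j, k = j + 1 := ⟨k - 1, by omega⟩
  have hts' : (List.takeWhile (fun t => decide (t = PvTok.byte b)) ts) = [] := by
    match ts with
    | [] => simp
    | u :: us =>
      have hu : u ≠ PvTok.byte b := hts u (by simp)
      simp [List.takeWhile_cons, hu]
  have hds : (List.dropWhile (fun t => decide (t = PvTok.byte b)) ts) = ts := by
    match ts with
    | [] => simp
    | u :: us =>
      have hu : u ≠ PvTok.byte b := hts u (by simp)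
      simp [List.dropWhile_cons, hu]
  have htw : ∀ m : Nat, List.takeWhile (fun t => decide (t = PvTok.byte b))
      (List.replicate m (PvTok.byte b) ++ ts) = List.replicate m (PvTok.byte b) := by
    intro m
    induction m with
    | zero => simpa using hts'
    | succ n ih => simp [List.replicate_succ, List.takeWhile_cons, ih]
  have hdw : ∀ m : Nat, List.dropWhile (fun t => decide (t = PvTok.byte b))
      (List.replicate m (PvTok.byte b) ++ ts) = ts := by
    intro m
    induction m with
    | zero => simpa using hds
    | succ n ih => simp [List.replicate_succ, List.dropWhile_cons, ih]
  rw [List.replicate_succ, List.cons_append]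
  conv_lhs => rw [pvMergeB.eq_def]
  simp only [htw j, hdw j, List.length_replicate]
  have hc : (1 : Int) + (j : Int) = (((j + 1 : Nat)) : Int) := by push_cast; ring
  rw [hc]

theorem pvGetBaseA_mem (item : List Char) (pb : Bool) :
    pvGetBaseA item pb = 'b' ∨ pvGetBaseA item pb = 'd' ∨ pvGetBaseA item pb = 'h' := by
  unfold pvGetBaseA; split_ifs <;> simp

theorem pvCountA_qq : pvCountA ['"', '"'] 1 0 = 0 := by
  rw [pvCountA_eq]; decide

theorem pvMergeB_nil (pb db : Bool) : pvMergeB pb db [] = (0, []) := by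
  rw [pvMergeB.eq_def]

theorem pvMergeB_text (pb db : Bool) (v : Int) (ts : List PvTok) :
    pvMergeB pb db (PvTok.text v :: ts)
      = (if v ≠ 0 then (v + (pvMergeB pb db ts).1,
           ((if db then ['T'] else []) ++ PySem.Int.toChars v) :: (pvMergeB pb db ts).2)
         else pvMergeB pb db ts) := by
  rw [pvMergeB.eq_def]

-- A's stateful accumulation loop computes B's run-merge of the corresponding tokens
theorem pvLoopA_eq_merge (pb db : Bool) : ∀ (items : List (List Char)) (k : Nat) (b : Char)
    (prev : Option Char) (full : Int) (lens : List (List Char)),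
    (k = 0 ∨ (prev = some b ∧ (b = 'b' ∨ b = 'd' ∨ b = 'h'))) →
    pvLoopA pb db (items ++ [['"', '"']]) full lens (k : Int) prev
      = (full + (pvMergeB pb db (List.replicate k (PvTok.byte b) ++ items.map (pvTokOf pb))).1,
         lens ++ (pvMergeB pb db (List.replicate k (PvTok.byte b) ++ items.map (pvTokOf pb))).2) := by
  intro items
  induction items with
  | nil =>
    intro k b prev full lens hkb
    simp only [List.nil_append, List.map_nil, List.append_nil]
    by_cases hk0 : k = 0
    · subst hk0
      simp only [Nat.cast_zero, List.replicate_zero, pvMergeB_nil]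
      rw [pvLoopA, if_pos (by decide), if_neg (by omega), pvCountA_qq, if_neg (by omega), pvLoopA]
      simp
    · have hk : 0 < k := Nat.pos_of_ne_zero hk0
      obtain ⟨hprev, hb⟩ : prev = some b ∧ (b = 'b' ∨ b = 'd' ∨ b = 'h') := by
        rcases hkb with h | h
        · exact absurd h hk0
        · exact h
      subst hprev
      rw [pvLoopA, if_pos (by decide), if_pos (by push_cast; omega), pvCountA_qq,
        if_neg (by omega), pvLoopA]
      have hrun := pvMergeB_run pb db k hk b [] (by simp)
      simp only [List.append_nil] at hrun
      rw [hrun, pvMergeB_nil, Option.getD_some, pvFmt_eq pb db b _ hb]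
      simp
  | cons it rest ih =>
    intro k b prev full lens hkb
    rw [List.cons_append, List.map_cons]
    by_cases hq : PySem.Chars.startswith it ['"'] = true
    · -- string item: flush any pending byte run, then emit a text segment if nonempty
      have htok : pvTokOf pb it = PvTok.text (pvCountA it 1 0) := by
        unfold pvTokOf; rw [if_pos hq]
      rw [htok]
      by_cases hk0 : k = 0
      · subst hk0
        simp only [Nat.cast_zero, List.replicate_zero, List.nil_append]
        rw [pvLoopA, if_pos hq, if_neg (by omega), pvMergeB_text]
        by_cases hv : pvCountA it 1 0 ≠ 0
        · have h0 := ih 0 'd' prev (full + pvCountA it 1 0)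
            (lens ++ [pvTextFmtA db (pvCountA it 1 0)]) (Or.inl rfl)
          simp only [Nat.cast_zero, List.replicate_zero, List.nil_append] at h0
          rw [if_pos hv, if_pos hv, h0]
          refine Prod.ext ?_ ?_ <;> simp [pvTextFmt_eq] <;> try ring
        · rw [if_neg hv, if_neg hv, show pvCountA it 1 0 = 0 from by omega]
          have := ih 0 'd' prev full lens (Or.inl rfl)
          simpa using this
      · have hk : 0 < k := Nat.pos_of_ne_zero hk0
        obtain ⟨hprev, hb⟩ : prev = some b ∧ (b = 'b' ∨ b = 'd' ∨ b = 'h') := by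
          rcases hkb with h | h
          · exact absurd h hk0
          · exact h
        subst hprev
        rw [pvLoopA, if_pos hq, if_pos (by push_cast; omega)]
        rw [pvMergeB_run pb db k hk b _ (by simp), pvMergeB_text, Option.getD_some,
          pvFmt_eq pb db b _ hb]
        by_cases hv : pvCountA it 1 0 ≠ 0
        · have h0 := ih 0 'd' none (full + (k : Int) + pvCountA it 1 0)
            (lens ++ [pvBytePrefixB b pb db ++ PySem.Int.toChars (k : Int)] ++ [pvTextFmtA db (pvCountA it 1 0)]) (Or.inl rfl)
          simp only [Nat.cast_zero, List.replicate_zero, List.nil_append] at h0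
          rw [if_pos hv, if_pos hv, h0]
          refine Prod.ext ?_ ?_ <;> simp [pvTextFmt_eq] <;> try ring
        · have h0 := ih 0 'd' none (full + (k : Int))
            (lens ++ [pvBytePrefixB b pb db ++ PySem.Int.toChars (k : Int)]) (Or.inl rfl)
          simp only [Nat.cast_zero, List.replicate_zero, List.nil_append] at h0
          rw [if_neg hv, if_neg hv, show pvCountA it 1 0 = 0 from by omega, h0]
          refine Prod.ext ?_ ?_ <;> simp [pvTextFmt_eq] <;> try ring
    · -- byte item: extend the pending run, or flush it when the base changes
      have htok : pvTokOf pb it = PvTok.byte (pvGetBaseA it pb) := by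
        unfold pvTokOf; rw [if_neg hq]
      have hmem := pvGetBaseA_mem it pb
      rw [htok]
      by_cases hk0 : k = 0
      · subst hk0
        simp only [Nat.cast_zero, List.replicate_zero, List.nil_append]
        rw [pvLoopA, if_neg hq, if_neg (by simp),
          show ((0 : Int) + 1) = (((1 : Nat)) : Int) from by norm_num,
          ih 1 (pvGetBaseA it pb) (some (pvGetBaseA it pb)) _ _ (Or.inr ⟨rfl, hmem⟩),
          show List.replicate 1 (PvTok.byte (pvGetBaseA it pb)) ++ rest.map (pvTokOf pb)
              = PvTok.byte (pvGetBaseA it pb) :: rest.map (pvTokOf pb) from by simp]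
      · have hk : 0 < k := Nat.pos_of_ne_zero hk0
        obtain ⟨hprev, hb⟩ : prev = some b ∧ (b = 'b' ∨ b = 'd' ∨ b = 'h') := by
          rcases hkb with h | h
          · exact absurd h hk0
          · exact h
        subst hprev
        by_cases hcb : pvGetBaseA it pb = b
        · rw [pvLoopA, if_neg hq, if_neg (by simp [hcb]),
            show ((k : Int) + 1) = (((k + 1 : Nat)) : Int) from by push_cast; ring, hcb,
            ih (k + 1) b (some b) _ _ (Or.inr ⟨rfl, hb⟩),
            show List.replicate (k + 1) (PvTok.byte b) ++ rest.map (pvTokOf pb)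
                = List.replicate k (PvTok.byte b) ++ (PvTok.byte b :: rest.map (pvTokOf pb)) from by
              rw [List.replicate_succ']; simp]
        · rw [pvLoopA, if_neg hq,
            if_pos ⟨by simp only [Ne, Option.some.injEq]; exact fun hh => hcb hh.symm,
              by push_cast; omega⟩,
            Option.getD_some,
            show ((1 : Int)) = (((1 : Nat)) : Int) from by norm_num,
            ih 1 (pvGetBaseA it pb) (some (pvGetBaseA it pb)) _ _ (Or.inr ⟨rfl, hmem⟩),
            pvMergeB_run pb db k hk b _ (by simpa using hcb), pvFmt_eq pb db b _ hb,
            show List.replicate 1 (PvTok.byte (pvGetBaseA it pb)) ++ rest.map (pvTokOf pb)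
                = PvTok.byte (pvGetBaseA it pb) :: rest.map (pvTokOf pb) from by simp]
          refine Prod.ext ?_ ?_ <;> simp [pvTextFmt_eq] <;> try ring

-- ===== VERDICT (by name: the statement is the Claim_ definition above) =====
theorem get_defb_length_spec : Claim_equal_get_defb_length := by
  intro s pb db _ _
  unfold Spec_get_defb_length get_defb_length get_defb_length_alt
  have h := pvLoopA_eq_merge pb db (pvItemsA s.toList) 0 'd' none 0 [] (Or.inl rfl)
  simp only [List.replicate_zero, List.nil_append, Nat.cast_zero] at h
  simp [h, pvTokens_eq]
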